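-- pv_equiv track=rewrite | github.com/Vladislave0-0/LLVM-course | 02_LLVM_Pass/analyze.py | find_frequent_patterns
-- ===== SOURCE A (Python) =====
-- from collections import Counter
--
-- def find_frequent_patterns(events: list[str], max_len: int = 5, top_k: int = 10) -> dict[int, list[tuple[str, int]]]:
--     results = {}
--     for length in range(1, max_len + 1):
--         pattern_counts = Counter()
--         for i in range(len(events) - length + 1):
--             pattern = "\n".join(events[i:i + length])
--             pattern_counts[pattern] += 1
--         results[length] = pattern_counts.most_common(top_k)
--     return results
-- ===== SOURCE B (Python) =====
-- from collections import Counter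
--
--
-- def find_frequent_patterns(events: list[str], max_len: int = 5, top_k: int = 10) -> dict[int, list[tuple[str, int]]]:
--     # Single pass over start indices: grow the pattern string incrementally and
--     # feed one Counter per length, instead of rescanning the list once per length.
--     n = len(events)
--     counts = {}
--     for L in range(1, max_len + 1):
--         counts[L] = Counter()
--     for i in range(n):
--         pattern = ""
--         for L in range(1, min(max_len, n - i) + 1):
--             pattern = events[i] if L == 1 else pattern + "\n" + events[i + L - 1]
--             counts[L][pattern] += 1
--     return {L: c.most_common(top_k) for L, c in counts.items()}
-- ===== Notes on version B (the rewrite author's own statement) =====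
-- stated objective: alternative
-- what changed: A rescans the whole event list once per pattern length (max_len independent passes, each re-joining a slice per window); B makes a single pass over start indices, growing the pattern string incrementally by one event per step and feeding one pre-initialized Counter per length, then takes most_common per length.
import Mathlib
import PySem

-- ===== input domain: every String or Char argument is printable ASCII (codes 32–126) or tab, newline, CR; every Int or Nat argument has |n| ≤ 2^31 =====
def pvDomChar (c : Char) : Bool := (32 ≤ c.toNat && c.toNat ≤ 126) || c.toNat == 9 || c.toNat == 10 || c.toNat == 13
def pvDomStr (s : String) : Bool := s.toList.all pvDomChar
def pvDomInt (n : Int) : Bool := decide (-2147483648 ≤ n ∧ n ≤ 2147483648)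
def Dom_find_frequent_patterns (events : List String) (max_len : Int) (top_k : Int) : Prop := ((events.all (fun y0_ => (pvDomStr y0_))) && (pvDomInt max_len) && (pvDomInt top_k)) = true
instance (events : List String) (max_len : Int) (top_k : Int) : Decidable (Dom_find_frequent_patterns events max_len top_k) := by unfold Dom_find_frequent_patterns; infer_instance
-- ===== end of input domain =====

-- B replaces A's max_len independent rescans of the event list (one inner scan per pattern
-- length) by a single pass over start indices that grows each pattern string incrementally
-- and feeds one counter per length (objective: alternative decomposition, same exact output).

-- shared helpers --------------------------------------------------------------
-- "\n".join(events[i:i+L]) — the pattern starting at i with length L (port A's pattern expression)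
def patF (events : List String) (i L : Int) : String :=
  PySem.Str.join "\n" (PySem.List.slice events (some i) (some (i + L)))

-- Counter.most_common(n) (both Pythons call this same library method): items sorted by count
-- descending — stable, so ties keep insertion order — truncated to n; heapq.nlargest gives [] for n ≤ 0
def pyMostCommon (d : PySem.Dict String Int) (n : Int) : List (String × Int) :=
  if n ≤ 0 then [] else (PySem.List.sorted d.items (fun p => p.2) true).take n.toNat

-- ===== PORT A =====
def find_frequent_patterns (events : List String) (max_len : Int) (top_k : Int) : List (Int × List (String × Int)) :=
  ((PySem.List.pyRange 1 (max_len + 1) 1).foldl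
    (fun results length =>
      let pattern_counts :=
        (PySem.List.pyRange 0 (PySem.List.len events - length + 1) 1).foldl
          (fun pattern_counts i => pattern_counts.modify (patF events i length) 0 (· + 1))
          PySem.Dict.empty
      results.insert length (pyMostCommon pattern_counts top_k))
    (PySem.Dict.empty : PySem.Dict Int (List (String × Int)))).items

-- ===== PORT B =====
-- single pass over start index i; inner state is (running pattern, dict of per-length counters);
-- 'pattern + "\n" + events[i+L-1]' is ported exactly as "\n".join([pattern, events[i+L-1]])
def find_frequent_patterns_alt (events : List String) (max_len : Int) (top_k : Int) : List (Int × List (String × Int)) :=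
  let n := PySem.List.len events
  let counts0 : PySem.Dict Int (PySem.Dict String Int) :=
    (PySem.List.pyRange 1 (max_len + 1) 1).foldl (fun d L => d.insert L PySem.Dict.empty) PySem.Dict.empty
  let counts :=
    (PySem.List.pyRange 0 n 1).foldl
      (fun cs i =>
        ((PySem.List.pyRange 1 (min max_len (n - i) + 1) 1).foldl
          (fun (st : String × PySem.Dict Int (PySem.Dict String Int)) L =>
            let pattern := if L == 1 then PySem.List.pyGetD events i ""
              else PySem.Str.join "\n" [st.1, PySem.List.pyGetD events (i + L - 1) ""]
            (pattern, st.2.modify L PySem.Dict.empty (fun c => c.modify pattern 0 (· + 1))))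
          ("", cs)).2)
      counts0
  (counts.items.foldl (fun r p => r.insert p.1 (pyMostCommon p.2 top_k)) PySem.Dict.empty).items

-- ===== PRECONDITION & SPEC =====
def Spec_find_frequent_patterns (events : List String) (max_len : Int) (top_k : Int) (out : List (Int × List (String × Int))) : Prop := out = find_frequent_patterns_alt events max_len top_k
instance (events : List String) (max_len : Int) (top_k : Int) (out : List (Int × List (String × Int))) : Decidable (Spec_find_frequent_patterns events max_len top_k out) := by unfold Spec_find_frequent_patterns; infer_instance

-- ===== CLAIM (what is proved, stated in full; the proofs are below) =====
def Claim_equal_find_frequent_patterns : Prop := ∀ (events : List String) (max_len : Int) (top_k : Int), Dom_find_frequent_patterns events max_len top_k → Spec_find_frequent_patterns events max_len top_k (find_frequent_patterns events max_len top_k)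

-- ===== LEMMAS AND PROOFS =====

-- B's inner-loop body (the port's lambda, named for the proofs)
def innerStepF (events : List String) (i : Int) (st : String × PySem.Dict Int (PySem.Dict String Int)) (L : Int) :
    String × PySem.Dict Int (PySem.Dict String Int) :=
  let pattern := if L == 1 then PySem.List.pyGetD events i ""
    else PySem.Str.join "\n" [st.1, PySem.List.pyGetD events (i + L - 1) ""]
  (pattern, st.2.modify L PySem.Dict.empty (fun c => c.modify pattern 0 (· + 1)))

-- the counter-only form of one inner step: bump counter L with the length-L pattern at start i
def modStep (events : List String) (i : Int) (cs : PySem.Dict Int (PySem.Dict String Int)) (L : Int) :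
    PySem.Dict Int (PySem.Dict String Int) :=
  cs.modify L PySem.Dict.empty (fun c => c.modify (patF events i L) 0 (· + 1))

-- B's whole inner loop, counter-only form
def bStep (events : List String) (max_len i : Int) (cs : PySem.Dict Int (PySem.Dict String Int)) : PySem.Dict Int (PySem.Dict String Int) :=
  (PySem.List.pyRange 1 (min max_len (PySem.List.len events - i) + 1)).foldl (modStep events i) cs

-- the per-length counter A builds: Counter of the length-L patterns starting at 0 ≤ i < b
def ctrFold (events : List String) (L b : Int) : PySem.Dict String Int :=
  (PySem.List.pyRange 0 b).foldl (fun pc i => pc.modify (patF events i L) 0 (· + 1)) PySem.Dict.empty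

theorem join_append_singleton (sep : List Char) (xs : List (List Char)) (y : List Char) (h : xs ≠ []) :
    PySem.Chars.join sep (xs ++ [y]) = PySem.Chars.join sep xs ++ sep ++ y := by
  induction xs with
  | nil => exact absurd rfl h
  | cons x t ih =>
    cases t with
    | nil => simp [PySem.Chars.join_cons_cons, PySem.Chars.join_singleton]
    | cons z t' =>
      have ih' := ih (by simp)
      rw [List.cons_append] at ih'
      rw [List.cons_append, List.cons_append, PySem.Chars.join_cons_cons, ih', PySem.Chars.join_cons_cons]
      simp [List.append_assoc]

theorem join_take_succ (t : List String) (k : Nat) (hk : 1 ≤ k) (hlt : k < t.length) :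
    PySem.Str.join "\n" [PySem.Str.join "\n" (t.take k), t[k]] = PySem.Str.join "\n" (t.take (k + 1)) := by
  apply String.toList_inj.mp
  rw [List.take_add_one, List.getElem?_eq_getElem hlt]
  simp only [PySem.Str.toList_join, List.map_cons, List.map_nil, List.map_append, Option.toList_some]
  rw [join_append_singleton _ _ _ (by
    intro hnil
    rw [List.map_eq_nil_iff, List.take_eq_nil_iff] at hnil
    rcases hnil with h' | h'
    · omega
    · rw [h'] at hlt; simp at hlt)]
  rw [PySem.Chars.join_cons_cons]
  simp [PySem.Chars.join_singleton]

theorem pat_one (events : List String) (i : Int) (h0 : 0 ≤ i) (h1 : i < (events.length : Int)) :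
    patF events i 1 = PySem.List.pyGetD events i "" := by
  have hj : i.toNat < events.length := by omega
  rw [patF, PySem.List.slice_toNat _ h0 (by omega), PySem.List.pyGetD_eq_getElem _ _ h0 h1]
  have h2 : (i + 1).toNat - i.toNat = 1 := by omega
  have hx : (events.drop i.toNat).take 1 = [events[i.toNat]] := by
    simp [List.take_one, List.head?_drop, List.getElem?_eq_getElem hj]
  rw [h2, hx]
  apply String.toList_inj.mp
  simp [PySem.Str.toList_join, PySem.Chars.join_singleton]

theorem pat_succ (events : List String) (i M : Int) (h0 : 0 ≤ i) (hM : 2 ≤ M)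
    (h : i + M ≤ (events.length : Int)) :
    PySem.Str.join "\n" [patF events i (M - 1), PySem.List.pyGetD events (i + M - 1) ""] = patF events i M := by
  rw [patF, patF, PySem.List.slice_toNat _ h0 (by omega), PySem.List.slice_toNat _ h0 (by omega),
    PySem.List.pyGetD_eq_getElem _ _ (by omega) (by omega)]
  have e1 : (i + (M - 1)).toNat - i.toNat = M.toNat - 1 := by omega
  have e2 : (i + M).toNat - i.toNat = M.toNat := by omega
  have hlt : M.toNat - 1 < (events.drop i.toNat).length := by
    rw [List.length_drop]; omega
  have hidx : events[(i + M - 1).toNat]'(by omega) = (events.drop i.toNat)[M.toNat - 1] := by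
    rw [List.getElem_drop]
    congr 1
    omega
  rw [e1, e2, hidx]
  have hjt := join_take_succ (events.drop i.toNat) (M.toNat - 1) (by omega) (by omega)
  rw [show M.toNat - 1 + 1 = M.toNat by omega] at hjt
  exact hjt

-- B's inner loop from length a ≥ 2 onward: the threaded pattern stays patF and the
-- counters evolve by modStep
theorem inner_spec (events : List String) (i m : Int) (h0 : 0 ≤ i) (hm : m ≤ (events.length : Int) - i) :
    ∀ (fuel : Nat) (a : Int) (c : PySem.Dict Int (PySem.Dict String Int)), 2 ≤ a → (m + 1 - a).toNat = fuel →
    ((PySem.List.pyRange a (m + 1)).foldl (innerStepF events i) (patF events i (a - 1), c)).2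
      = (PySem.List.pyRange a (m + 1)).foldl (modStep events i) c := by
  intro fuel
  induction fuel with
  | zero =>
    intro a c ha hf
    rw [PySem.List.pyRange_one_eq_nil (by omega)]
    rfl
  | succ f ih =>
    intro a c ha hf
    have hab : a < m + 1 := by omega
    rw [PySem.List.pyRange_one_cons hab]
    simp only [List.foldl_cons]
    have hbeq : (a == 1) = false := by
      rw [beq_eq_false_iff_ne]; omega
    have hstep : innerStepF events i (patF events i (a - 1), c) a
        = (patF events i a, modStep events i c a) := by
      rw [innerStepF, hbeq]
      simp only [Bool.false_eq_true, if_false]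
      rw [pat_succ events i a h0 ha (by omega)]
      rfl
    rw [hstep]
    have := ih (a + 1) (modStep events i c a) (by omega) (by omega)
    rw [show a + 1 - 1 = a by ring] at this
    exact this

-- B's whole inner loop (from L = 1, dummy initial pattern) equals the counter-only fold
theorem inner_eq (events : List String) (max_len i : Int) (h0 : 0 ≤ i) (h1 : i < (events.length : Int))
    (c : PySem.Dict Int (PySem.Dict String Int)) :
    ((PySem.List.pyRange 1 (min max_len (PySem.List.len events - i) + 1)).foldl (innerStepF events i) ("", c)).2
      = bStep events max_len i c := by
  rw [bStep]
  set m := min max_len (PySem.List.len events - i) with hm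
  have hmle : m ≤ (events.length : Int) - i := by
    rw [hm, PySem.List.len_eq]; omega
  by_cases hpos : 1 ≤ m
  · rw [PySem.List.pyRange_one_cons (by omega), List.foldl_cons, List.foldl_cons]
    have hstep1 : innerStepF events i ("", c) 1 = (patF events i 1, modStep events i c 1) := by
      rw [innerStepF]
      simp only [BEq.rfl, if_true]
      rw [pat_one events i h0 h1, modStep, pat_one events i h0 h1]
    rw [hstep1]
    have := inner_spec events i m h0 hmle (m + 1 - 2).toNat 2 (modStep events i c 1) (by omega) rfl
    rw [show (2 : Int) - 1 = 1 by ring] at this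
    exact this
  · rw [PySem.List.pyRange_one_eq_nil (by omega)]
    rfl

-- lookup through a fold of modifies keyed by a range of distinct ints
theorem foldl_modify_getD (events : List String) (i : Int) :
    ∀ (fuel : Nat) (a b : Int) (c : PySem.Dict Int (PySem.Dict String Int)) (L : Int), (b - a).toNat = fuel →
    ((PySem.List.pyRange a b).foldl (modStep events i) c).getD L PySem.Dict.empty
    = if a ≤ L ∧ L < b then (c.getD L PySem.Dict.empty).modify (patF events i L) 0 (· + 1)
      else c.getD L PySem.Dict.empty := by
  intro fuel
  induction fuel with
  | zero =>
    intro a b c L hf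
    rw [PySem.List.pyRange_one_eq_nil (by omega), if_neg (by omega)]
    rfl
  | succ f ih =>
    intro a b c L hf
    rw [PySem.List.pyRange_one_cons (by omega), List.foldl_cons,
      ih (a + 1) b (modStep events i c a) L (by omega)]
    rw [modStep, PySem.Dict.getD_modify]
    split_ifs <;> first | (subst_vars; rfl) | omega

theorem getD_foldl_insert_empty (l : List Int) :
    ∀ (c : PySem.Dict Int (PySem.Dict String Int)), (∀ L, c.getD L PySem.Dict.empty = PySem.Dict.empty) →
    ∀ L, (l.foldl (fun d L' => d.insert L' PySem.Dict.empty) c).getD L PySem.Dict.empty = PySem.Dict.empty := by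
  induction l with
  | nil => intro c hc L; exact hc L
  | cons x t ih =>
    intro c hc L
    refine ih _ (fun L' => ?_) L
    rw [PySem.Dict.getD_insert]
    split <;> simp [hc]

-- lookup in B's counts dict after the first k starts equals A's per-length counter fold
theorem outer_getD (events : List String) (max_len : Int) (counts0 : PySem.Dict Int (PySem.Dict String Int))
    (h0 : ∀ L, counts0.getD L PySem.Dict.empty = PySem.Dict.empty) :
    ∀ (k : Nat), k ≤ events.length → ∀ L : Int, 1 ≤ L → L ≤ max_len →
    (((PySem.List.pyRange 0 (k : Int)).foldl (fun cs i => bStep events max_len i cs) counts0).getD L PySem.Dict.empty)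
      = ctrFold events L (min (k : Int) ((events.length : Int) - L + 1)) := by
  intro k
  induction k with
  | zero =>
    intro _ L h1 h2
    rw [Nat.cast_zero, PySem.List.pyRange_one_eq_nil (by omega), List.foldl_nil, h0 L,
      ctrFold, PySem.List.pyRange_one_eq_nil (by omega), List.foldl_nil]
  | succ k ih =>
    intro hk1 L h1 h2
    have hkl : (k : Int) < (events.length : Int) := by exact_mod_cast hk1
    rw [Nat.cast_add, Nat.cast_one, PySem.List.pyRange_one_succ_right (by omega),
      List.foldl_append, List.foldl_cons, List.foldl_nil]
    rw [bStep, PySem.List.len_eq]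
    rw [foldl_modify_getD events k (min max_len ((events.length : Int) - k) + 1 - 1).toNat 1 _ _ L (by rfl)]
    rw [ih (by omega) L h1 h2]
    by_cases hC : L ≤ (events.length : Int) - k
    · rw [if_pos ⟨h1, by omega⟩]
      have e1 : min (k : Int) ((events.length : Int) - L + 1) = (k : Int) := by omega
      have e2 : min ((k : Int) + 1) ((events.length : Int) - L + 1) = (k : Int) + 1 := by omega
      rw [e1, e2, ctrFold, ctrFold, PySem.List.pyRange_one_succ_right (by omega),
        List.foldl_append, List.foldl_cons, List.foldl_nil]
    · rw [if_neg (by omega)]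
      have e3 : min ((k : Int) + 1) ((events.length : Int) - L + 1) = min (k : Int) ((events.length : Int) - L + 1) := by omega
      rw [e3]

theorem set_update_subset (s xs : List Int) (h : ∀ x ∈ xs, x ∈ s) : PySem.Set.update s xs = s := by
  rw [PySem.Set.update_eq_append_filter]
  have hnil : (PySem.Set.ofList xs).filter (fun y => !PySem.Set.contains s y) = [] := by
    rw [List.filter_eq_nil_iff]
    intro a ha
    have : a ∈ xs := (PySem.Set.mem_ofList xs a).mp ha
    simp [PySem.Set.contains_eq_listContains, h a this]
  rw [hnil, List.append_nil]

theorem keys_bStep (events : List String) (max_len i : Int)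
    (cs : PySem.Dict Int (PySem.Dict String Int)) (hks : cs.keys = PySem.List.pyRange 1 (max_len + 1)) :
    (bStep events max_len i cs).keys = PySem.List.pyRange 1 (max_len + 1) := by
  rw [bStep]
  have hconv : List.foldl (modStep events i) cs (PySem.List.pyRange 1 (min max_len (PySem.List.len events - i) + 1))
      = List.foldl (fun d x => d.modify x PySem.Dict.empty
          ((fun (_ : PySem.Dict Int (PySem.Dict String Int)) (x : Int) => fun c => c.modify (patF events i x) 0 (· + 1)) d x))
          cs (PySem.List.pyRange 1 (min max_len (PySem.List.len events - i) + 1)) := rfl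
  rw [hconv, PySem.Dict.keys_foldl_modify, hks]
  apply set_update_subset
  intro x hx
  rw [PySem.List.mem_pyRange_one] at hx ⊢
  omega

theorem keys_outer (events : List String) (max_len : Int) :
    ∀ (l : List Int) (cs : PySem.Dict Int (PySem.Dict String Int)),
    cs.keys = PySem.List.pyRange 1 (max_len + 1) →
    (l.foldl (fun cs i => bStep events max_len i cs) cs).keys = PySem.List.pyRange 1 (max_len + 1) := by
  intro l
  induction l with
  | nil => intro cs h; exact h
  | cons x t ih =>
    intro cs h
    exact ih _ (keys_bStep events max_len x cs h)

theorem keys_counts0 (max_len : Int) :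
    (((PySem.List.pyRange 1 (max_len + 1)).foldl
      (fun (d : PySem.Dict Int (PySem.Dict String Int)) L => d.insert L PySem.Dict.empty) PySem.Dict.empty)).keys
      = PySem.List.pyRange 1 (max_len + 1) := by
  have hconv : List.foldl (fun (d : PySem.Dict Int (PySem.Dict String Int)) L => d.insert L PySem.Dict.empty)
      PySem.Dict.empty (PySem.List.pyRange 1 (max_len + 1))
      = List.foldl (fun d x => d.insert x
          ((fun (_ : PySem.Dict Int (PySem.Dict String Int)) (_ : Int) => (PySem.Dict.empty : PySem.Dict String Int)) d x))
          PySem.Dict.empty (PySem.List.pyRange 1 (max_len + 1)) := rfl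
  rw [hconv, PySem.Dict.keys_foldl_insert]
  have : (PySem.Dict.empty : PySem.Dict Int (PySem.Dict String Int)).keys = [] := rfl
  rw [this, PySem.Set.update_nil_left, PySem.Set.ofList_eq_self_of_nodup _ (PySem.List.nodup_pyRange_one 1 (max_len + 1))]

-- ===== VERDICT (by name: the statement is the Claim_ definition above) =====
theorem find_frequent_patterns_spec : Claim_equal_find_frequent_patterns := by
  intro events max_len top_k _
  rw [Spec_find_frequent_patterns]
  -- A's side: insert per ascending fresh length
  have hA : find_frequent_patterns events max_len top_k
      = ((PySem.List.pyRange 1 (max_len + 1)).foldl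
          (fun (d : PySem.Dict Int (List (String × Int))) a =>
            d.insert a (pyMostCommon (ctrFold events a (PySem.List.len events - a + 1)) top_k))
          PySem.Dict.empty).items := rfl
  rw [hA, PySem.Dict.items_foldl_insert_fresh _ (fun a => a)
    (fun a => pyMostCommon (ctrFold events a (PySem.List.len events - a + 1)) top_k) _
    (fun a _ => PySem.Dict.contains_empty a)
    (by rw [List.map_id']; exact PySem.List.nodup_pyRange_one 1 (max_len + 1))]
  -- B's side, with the inner-loop lambda read as innerStepF (definitional)
  have hB : find_frequent_patterns_alt events max_len top_k
      = (((PySem.List.pyRange 0 (PySem.List.len events)).foldl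
            (fun cs i =>
              ((PySem.List.pyRange 1 (min max_len (PySem.List.len events - i) + 1)).foldl (innerStepF events i) ("", cs)).2)
            ((PySem.List.pyRange 1 (max_len + 1)).foldl
              (fun (d : PySem.Dict Int (PySem.Dict String Int)) L => d.insert L PySem.Dict.empty) PySem.Dict.empty)).items.foldl
          (fun r p => r.insert p.1 (pyMostCommon p.2 top_k)) PySem.Dict.empty).items := rfl
  rw [hB]
  -- replace the threaded inner loop by its counter-only form
  have hcongr : (PySem.List.pyRange 0 (PySem.List.len events)).foldl
      (fun cs i =>
        ((PySem.List.pyRange 1 (min max_len (PySem.List.len events - i) + 1)).foldl (innerStepF events i) ("", cs)).2)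
      ((PySem.List.pyRange 1 (max_len + 1)).foldl
        (fun (d : PySem.Dict Int (PySem.Dict String Int)) L => d.insert L PySem.Dict.empty) PySem.Dict.empty)
      = (PySem.List.pyRange 0 (PySem.List.len events)).foldl (fun cs i => bStep events max_len i cs)
        ((PySem.List.pyRange 1 (max_len + 1)).foldl
          (fun (d : PySem.Dict Int (PySem.Dict String Int)) L => d.insert L PySem.Dict.empty) PySem.Dict.empty) := by
    apply PySem.List.foldl_congr_mem
    intro acc x hx
    rw [PySem.List.mem_pyRange_one, PySem.List.len_eq] at hx
    exact inner_eq events max_len x hx.1 hx.2 acc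
  rw [hcongr]

  set counts0 := (PySem.List.pyRange 1 (max_len + 1)).foldl
    (fun (d : PySem.Dict Int (PySem.Dict String Int)) L => d.insert L PySem.Dict.empty) PySem.Dict.empty with hc0
  set counts := (PySem.List.pyRange 0 (PySem.List.len events)).foldl
    (fun cs i => bStep events max_len i cs) counts0 with hcounts
  have hkeys : counts.keys = PySem.List.pyRange 1 (max_len + 1) := by
    rw [hcounts]
    exact keys_outer events max_len _ counts0 (keys_counts0 max_len)
  have hgetD : ∀ L : Int, 1 ≤ L → L ≤ max_len →
      counts.getD L PySem.Dict.empty = ctrFold events L ((events.length : Int) - L + 1) := by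
    intro L h1 h2
    have h0' : ∀ L, counts0.getD L PySem.Dict.empty = PySem.Dict.empty := by
      intro L'
      rw [hc0]
      exact getD_foldl_insert_empty _ _ (fun _ => rfl) L'
    have := outer_getD events max_len counts0 h0' events.length (le_refl _) L h1 h2
    rw [hcounts, PySem.List.len_eq, this]
    congr 1
    omega
  have hitems : counts.items = (PySem.List.pyRange 1 (max_len + 1)).map
      (fun L => (L, ctrFold events L ((events.length : Int) - L + 1))) := by
    rw [PySem.Dict.items_eq_map_keys counts (by rw [hkeys]; exact PySem.List.nodup_pyRange_one 1 (max_len + 1)) PySem.Dict.empty, hkeys]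
    apply List.map_congr_left
    intro L hL
    rw [PySem.List.mem_pyRange_one] at hL
    rw [hgetD L hL.1 (by omega)]
  rw [hitems]
  have hnd : ((PySem.List.pyRange 1 (max_len + 1)).map
      (fun L => (L, ctrFold events L ((events.length : Int) - L + 1))) |>.map (fun p => p.1)).Nodup := by
    rw [List.map_map]
    have he : ((fun (p : Int × PySem.Dict String Int) => p.1) ∘ fun L => (L, ctrFold events L ((events.length : Int) - L + 1))) = fun L => L := rfl
    rw [he, List.map_id']
    exact PySem.List.nodup_pyRange_one 1 (max_len + 1)
  have hfresh := PySem.Dict.items_foldl_insert_fresh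
    ((PySem.List.pyRange 1 (max_len + 1)).map (fun L => (L, ctrFold events L ((events.length : Int) - L + 1))))
    (fun p => p.1) (fun p => pyMostCommon p.2 top_k) PySem.Dict.empty
    (fun a _ => PySem.Dict.contains_empty a.1) hnd
  simp only [] at hfresh
  rw [hfresh, List.map_map]
  have hempty : (PySem.Dict.empty : PySem.Dict Int (List (String × Int))).items = [] := rfl
  rw [hempty, List.nil_append, List.nil_append]
  apply List.map_congr_left
  intro L hL
  simp only [Function.comp]
  rw [PySem.List.len_eq]
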